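-- pv_equiv track=rewrite | github.com/nandika-k/TIP101 | Week 2/has_duplicates.py | hasDuplicates
-- ===== SOURCE A (Python) =====
-- def hasDuplicates(nums, k):
--     dict = {}
--     nums2 = nums[0:k]
--
--     for i in nums2:
--         if i in dict:
--             return True
--         else:
--             dict[i] = 1
--     return False
-- ===== SOURCE B (Python) =====
-- def hasDuplicates(nums, k):
--     sub = sorted(nums[0:k])
--     return any(a == b for a, b in zip(sub, sub[1:]))
-- ===== Notes on version B (the rewrite author's own statement) =====
-- stated objective: alternative
-- what changed: Replaces hashing (dict membership with early return) by a comparison-based algorithm: sort the first k elements and scan once for an equal adjacent pair; duplicates exist iff some adjacent pair of the sorted prefix is equal.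
import Mathlib
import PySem

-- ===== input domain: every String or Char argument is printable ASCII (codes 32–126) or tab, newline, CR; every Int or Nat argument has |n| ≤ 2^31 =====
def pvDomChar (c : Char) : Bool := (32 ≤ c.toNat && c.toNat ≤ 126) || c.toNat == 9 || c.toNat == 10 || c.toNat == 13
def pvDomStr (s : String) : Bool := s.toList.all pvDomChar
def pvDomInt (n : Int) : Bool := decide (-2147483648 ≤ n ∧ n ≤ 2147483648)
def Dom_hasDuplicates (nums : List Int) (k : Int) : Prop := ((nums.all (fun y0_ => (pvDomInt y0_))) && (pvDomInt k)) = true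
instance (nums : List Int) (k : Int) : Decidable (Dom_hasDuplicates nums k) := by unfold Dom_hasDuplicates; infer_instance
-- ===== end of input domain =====

-- B replaces A's hash-based early-exit scan by a comparison-based algorithm: sort the first k
-- elements, then scan once for an equal adjacent pair (alternative algorithm; O(k log k)).

-- ===== PORT A =====
-- for i in nums2: if i in dict: return True else: dict[i] = 1; after the loop: return False
def hdLoop : List Int → PySem.Dict Int Int → Bool
  | [], _ => false
  | i :: rest, d => if d.contains i then true else hdLoop rest (d.insert i 1)

def hasDuplicates (nums : List Int) (k : Int) : Bool :=
  hdLoop (PySem.List.slice nums (some 0) (some k)) PySem.Dict.empty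

-- ===== PORT B =====
-- any(a == b for a, b in zip(sub, sub[1:])) over the sorted prefix
def anyAdjEq : List Int → Bool
  | a :: b :: t => (a == b) || anyAdjEq (b :: t)
  | _ => false

def hasDuplicates_alt (nums : List Int) (k : Int) : Bool :=
  let sub := PySem.List.sorted (PySem.List.slice nums (some 0) (some k)) (fun x => x) false
  anyAdjEq sub

-- ===== PRECONDITION & SPEC =====
def Spec_hasDuplicates (nums : List Int) (k : Int) (out : Bool) : Prop := out = hasDuplicates_alt nums k
instance (nums : List Int) (k : Int) (out : Bool) : Decidable (Spec_hasDuplicates nums k out) := by unfold Spec_hasDuplicates; infer_instance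

-- ===== CLAIM =====
def Claim_equal_hasDuplicates : Prop := ∀ (nums : List Int) (k : Int), Dom_hasDuplicates nums k → Spec_hasDuplicates nums k (hasDuplicates nums k)

-- ===== LEMMAS AND PROOFS =====

-- A's loop returns False exactly when the traversed list is duplicate-free and disjoint from the dict.
theorem hdLoop_eq_false_iff (l : List Int) (d : PySem.Dict Int Int) :
    hdLoop l d = false ↔ l.Nodup ∧ ∀ x ∈ l, d.contains x = false := by
  induction l generalizing d with
  | nil => simp [hdLoop]
  | cons i rest ih =>
    by_cases h : d.contains i = true
    · simp only [hdLoop, h, if_true]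
      constructor
      · intro hc; cases hc
      · rintro ⟨_, hall⟩
        have := hall i (List.mem_cons_self ..)
        rw [h] at this; cases this
    · simp only [hdLoop, if_neg h, ih]
      rw [Bool.not_eq_true] at h
      constructor
      · rintro ⟨hn, hall⟩
        refine ⟨List.nodup_cons.mpr ⟨fun hmem => ?_, hn⟩, fun x hx => ?_⟩
        · have := hall i hmem
          rw [PySem.Dict.contains_insert] at this
          simp at this
        · rcases List.mem_cons.mp hx with rfl | hx'
          · exact h
          · have := hall x hx'
            rw [PySem.Dict.contains_insert] at this
            simp at this
            exact this.2
      · rintro ⟨hn, hall⟩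
        rcases List.nodup_cons.mp hn with ⟨hni, hn'⟩
        refine ⟨hn', fun x hx => ?_⟩
        rw [PySem.Dict.contains_insert]
        simp only [Bool.or_eq_false_iff, beq_eq_false_iff_ne, ne_eq]
        exact ⟨fun hxi => hni (hxi ▸ hx), hall x (List.mem_cons_of_mem _ hx)⟩

-- on a ≤-sorted list, no equal adjacent pair exactly means no duplicates
theorem anyAdjEq_eq_false_iff (l : List Int) (hs : l.Pairwise (· ≤ ·)) :
    anyAdjEq l = false ↔ l.Nodup := by
  induction l with
  | nil => simp [anyAdjEq]
  | cons a rest ih =>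
    cases rest with
    | nil => simp [anyAdjEq]
    | cons b t =>
      rcases List.pairwise_cons.mp hs with ⟨hale, hbt⟩
      rcases List.pairwise_cons.mp hbt with ⟨hble, _⟩
      simp only [anyAdjEq, Bool.or_eq_false_iff, beq_eq_false_iff_ne, ne_eq, ih hbt]
      constructor
      · rintro ⟨hab, hn⟩
        refine List.nodup_cons.mpr ⟨?_, hn⟩
        intro hmem
        rcases List.mem_cons.mp hmem with rfl | hat
        · exact hab rfl
        · have hab' : a < b := lt_of_le_of_ne (hale b (List.mem_cons_self ..)) hab
          have := hble a hat
          omega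
      · intro hn
        rcases List.nodup_cons.mp hn with ⟨hni, hn'⟩
        exact ⟨fun hab => hni (hab ▸ List.mem_cons_self ..), hn'⟩

-- ===== VERDICT =====
theorem hasDuplicates_spec : Claim_equal_hasDuplicates := by
  intro nums k _
  unfold Spec_hasDuplicates hasDuplicates hasDuplicates_alt
  set l := PySem.List.slice nums (some 0) (some k) with hl
  set s := PySem.List.sorted l (fun x => x) false with hsdef
  have hperm : s.Perm l := PySem.List.sorted_perm ..
  have hpw : s.Pairwise (· ≤ ·) := PySem.List.sorted_pairwise ..
  have hiff : anyAdjEq s = false ↔ l.Nodup := by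
    rw [anyAdjEq_eq_false_iff s hpw, hperm.nodup_iff]
  by_cases hn : l.Nodup
  · have hA : hdLoop l PySem.Dict.empty = false :=
      (hdLoop_eq_false_iff l PySem.Dict.empty).mpr ⟨hn, by intro x _; rfl⟩
    rw [hA, (hiff.mpr hn)]
  · have hA : hdLoop l PySem.Dict.empty = true := by
      by_contra hc
      rw [Bool.not_eq_true] at hc
      exact hn ((hdLoop_eq_false_iff l PySem.Dict.empty).mp hc).1
    have hB : anyAdjEq s = true := by
      by_contra hc
      rw [Bool.not_eq_true] at hc
      exact hn (hiff.mp hc)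
    rw [hA, hB]
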